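-- pv_equiv track=rewrite | github.com/dj-on-github/markov2p | generate.py | count
-- ===== SOURCE A (Python) =====
-- def count(data):
--     c1 = data[0]
--     c11 = 0
--     lastbit = c1
--     for i,bit in enumerate(data[1:]):
--         if lastbit == 1 and bit == 1:
--             c11 += 1
--         if bit == 1:
--             c1 += 1
--         lastbit = bit
--     return c1,c11
-- ===== SOURCE B (Python) =====
-- def count(data):
--     c1 = data[0] + sum(1 for b in data[1:] if b == 1)
--     c11 = sum(1 for a, b in zip(data, data[1:]) if a == 1 and b == 1)
--     return c1, c11
-- ===== Notes on version B (the rewrite author's own statement) =====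
-- stated objective: simpler
-- what changed: Replaces the single stateful loop tracking lastbit with two independent passes: a count of 1s (seeded with the raw data[0]) and a zip of the list with its tail for adjacent 1-1 pairs.
import Mathlib
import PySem

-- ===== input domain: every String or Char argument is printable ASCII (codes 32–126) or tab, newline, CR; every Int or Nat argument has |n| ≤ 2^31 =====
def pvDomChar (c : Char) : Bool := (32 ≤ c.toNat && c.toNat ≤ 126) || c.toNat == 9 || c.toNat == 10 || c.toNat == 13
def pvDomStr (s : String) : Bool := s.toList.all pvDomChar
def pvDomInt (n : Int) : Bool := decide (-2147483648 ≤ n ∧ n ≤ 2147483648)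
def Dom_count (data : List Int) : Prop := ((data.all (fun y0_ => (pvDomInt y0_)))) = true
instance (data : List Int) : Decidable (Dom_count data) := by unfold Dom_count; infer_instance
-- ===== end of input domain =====

-- B replaces A's single stateful loop (tracking lastbit) with two independent passes:
-- count of 1s seeded with data[0], and a zip-with-tail count of adjacent 1-1 pairs (objective: simpler).


-- ===== PORT A =====
-- one loop over data[1:] with state (c1, c11, lastbit)
def countStep (s : Int × Int × Int) (bit : Int) : Int × Int × Int :=
  let c11 := if s.2.2 = 1 ∧ bit = 1 then s.2.1 + 1 else s.2.1
  let c1 := if bit = 1 then s.1 + 1 else s.1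
  (c1, c11, bit)

def count (data : List Int) : Int × Int :=
  let c1 := (PySem.List.pyGet? data 0).getD 0   -- data[0]; none (IndexError) excluded by Pre_count
  let st := (data.drop 1).foldl countStep (c1, 0, c1)
  (st.1, st.2.1)

-- ===== PORT B =====
def count_alt (data : List Int) : Int × Int :=
  let c1 := (PySem.List.pyGet? data 0).getD 0
      + (((data.drop 1).filter (fun b => b = 1)).length : Int)
  let c11 := (((data.zip (data.drop 1)).filter (fun p => p.1 = 1 ∧ p.2 = 1)).length : Int)
  (c1, c11)

-- ===== PRECONDITION & SPEC =====
-- A raises IndexError on the empty list (data[0]); B also raises there.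
def Pre_count (data : List Int) : Prop := data ≠ []
instance (data : List Int) : Decidable (Pre_count data) := by unfold Pre_count; infer_instance
def pvWitness_count : List Int := [1, 0, 1, 1]

def Spec_count (data : List Int) (out : Int × Int) : Prop := out = count_alt data
instance (data : List Int) (out : Int × Int) : Decidable (Spec_count data out) := by unfold Spec_count; infer_instance

-- ===== CLAIM (what is proved, stated in full; the proofs are below) =====
def Claim_equal_count : Prop := ∀ (data : List Int), Dom_count data → Pre_count data → Spec_count data (count data)

-- ===== LEMMAS AND PROOFS =====

theorem count_fold_inv (xs : List Int) (c1 c11 lb : Int) :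
    (xs.foldl countStep (c1, c11, lb)).1
      = c1 + ((xs.filter (fun b => b = 1)).length : Int) ∧
    (xs.foldl countStep (c1, c11, lb)).2.1
      = c11 + ((((lb :: xs).zip xs).filter (fun p => p.1 = 1 ∧ p.2 = 1)).length : Int) := by
  induction xs generalizing c1 c11 lb with
  | nil => simp
  | cons b rest ih =>
    have h := ih (if b = 1 then c1 + 1 else c1) (if lb = 1 ∧ b = 1 then c11 + 1 else c11) b
    constructor
    · rw [List.foldl_cons]
      show (rest.foldl countStep (if b = 1 then c1 + 1 else c1,
        if lb = 1 ∧ b = 1 then c11 + 1 else c11, b)).1 = _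
      rw [h.1]
      by_cases hb : b = 1 <;> simp [hb] <;> push_cast <;> ring
    · rw [List.foldl_cons]
      show (rest.foldl countStep (if b = 1 then c1 + 1 else c1,
        if lb = 1 ∧ b = 1 then c11 + 1 else c11, b)).2.1 = _
      rw [h.2]
      by_cases hp : lb = 1 ∧ b = 1 <;> simp [hp] <;> push_cast <;> ring

-- ===== VERDICT (by name: the statement is the Claim_ definition above) =====
theorem count_spec : Claim_equal_count := by
  intro data _ hpre
  unfold Spec_count count count_alt
  cases data with
  | nil => exact absurd rfl hpre
  | cons x xs =>
    have h := count_fold_inv xs ((PySem.List.pyGet? (x :: xs) 0).getD 0) 0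
      ((PySem.List.pyGet? (x :: xs) 0).getD 0)
    have hx : (PySem.List.pyGet? (x :: xs) 0).getD 0 = x := by
      simp [PySem.List.pyGet?, PySem.List.pyIdx?]
    simp only [hx] at h ⊢
    simp only [List.drop_succ_cons, List.drop_zero]
    exact Prod.ext (by simpa using h.1) (by simpa using h.2)
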